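-- pv_equiv track=rewrite | github.com/szf963852/2017A2CS | ch25/recursion- Godfrey.py | array6
-- ===== SOURCE A (Python) =====
-- def array6(list, index):
--     if index>=len(list):
--         return False
--     else:
--         if list[index]==6:
--             return True
--         else:
--             return array6(list,index+1)
-- ===== SOURCE B (Python) =====
-- def array6(list, index):
--     start = index if index >= 0 else 0
--     return 6 in list[start:]
-- ===== Notes on version B (the rewrite author's own statement) =====
-- stated objective: simpler
-- what changed: Replaces the tail-recursive element-by-element scan with a direct membership test on the slice list[start:] (start clamped to 0 for negative indices, where the recursion wraps around and effectively scans the whole list).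
import Mathlib
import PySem

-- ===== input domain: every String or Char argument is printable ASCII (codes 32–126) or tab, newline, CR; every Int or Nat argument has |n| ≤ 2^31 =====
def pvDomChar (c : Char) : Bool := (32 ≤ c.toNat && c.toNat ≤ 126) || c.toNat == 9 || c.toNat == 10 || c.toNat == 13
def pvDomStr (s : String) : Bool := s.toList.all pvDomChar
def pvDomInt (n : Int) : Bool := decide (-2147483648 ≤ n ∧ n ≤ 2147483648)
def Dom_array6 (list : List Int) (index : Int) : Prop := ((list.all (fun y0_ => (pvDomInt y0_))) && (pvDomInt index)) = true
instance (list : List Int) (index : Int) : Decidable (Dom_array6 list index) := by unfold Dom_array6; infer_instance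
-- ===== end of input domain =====

-- B is a slice-membership closed form; the one-line header: B replaces A's tail recursion by '6 in list[start:]' (simpler).

-- ===== PORT A =====
-- literal transliteration of A's tail recursion; Python's list[index]
-- (IndexError = none, excluded by Pre_) becomes pyGet?; on none we return false.
def array6 (list : List Int) (index : Int) : Bool :=
  if (list.length : Int) ≤ index then false
  else
    match PySem.List.pyGet? list index with
    | none => false  -- IndexError: outside Pre_array6
    | some v => if v == 6 then true else array6 list (index + 1)
termination_by ((list.length : Int) - index).toNat
decreasing_by omega

-- ===== PORT B =====
-- transliteration of Source B: clamp the start, then '6 in list[start:]'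
def array6_alt (list : List Int) (index : Int) : Bool :=
  let start : Int := if 0 ≤ index then index else 0
  (PySem.List.slice list (some start) none).contains 6

-- ===== PRECONDITION & SPEC =====
-- Pre_ excludes exactly the inputs where A raises IndexError: index < -len(list),
-- where Python's negative-index wraparound falls off the front of the list.
def Pre_array6 (list : List Int) (index : Int) : Prop := -(list.length : Int) ≤ index
instance (list : List Int) (index : Int) : Decidable (Pre_array6 list index) := by
  unfold Pre_array6; infer_instance
def pvWitness_array6 : List Int × Int := ([1, 6, 3], 0)

def Spec_array6 (list : List Int) (index : Int) (out : Bool) : Prop := out = array6_alt list index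
instance (list : List Int) (index : Int) (out : Bool) : Decidable (Spec_array6 list index out) := by
  unfold Spec_array6; infer_instance

-- ===== CLAIM (what is proved, stated in full; the proofs are below) =====
def Claim_equal_array6 : Prop := ∀ (list : List Int) (index : Int), Dom_array6 list index → Pre_array6 list index → Spec_array6 list index (array6 list index)

-- ===== LEMMAS AND PROOFS =====

-- For a nonnegative start, A's recursion is membership of 6 in the dropped suffix.
theorem array6_nonneg (list : List Int) (index : Int) (h0 : 0 ≤ index) :
    array6 list index = (list.drop index.toNat).contains 6 := by
  by_cases hlen : (list.length : Int) ≤ index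
  · rw [array6]
    simp only [hlen, if_pos]
    have : list.length ≤ index.toNat := by omega
    simp [List.drop_eq_nil_of_le this]
  · rw [array6]
    simp only [hlen, if_neg, not_false_iff]
    have hlt : index.toNat < list.length := by omega
    rw [PySem.List.pyGet?_eq_some_getElem list h0 (by omega : index < (list.length : Int))]
    have hdrop : list.drop index.toNat = list[index.toNat] :: list.drop (index.toNat + 1) :=
      List.drop_eq_getElem_cons hlt
    have hrec : array6 list (index + 1) = (list.drop (index + 1).toNat).contains 6 :=
      array6_nonneg list (index + 1) (by omega)
    by_cases h6 : list[index.toNat] = 6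
    · simp [h6, hdrop]
    · have : (list[index.toNat] == 6) = false := by simp [h6]
      simp only [this, if_neg, Bool.false_eq_true, not_false_iff]
      have h1 : (index + 1).toNat = index.toNat + 1 := by omega
      have h2 : (6 == list[index.toNat]) = false := by
        simp [Ne.symm h6]
      rw [hrec, h1, hdrop, List.contains_cons, h2, Bool.false_or]
termination_by ((list.length : Int) - index).toNat
decreasing_by omega

-- For a negative start within range, A's wraparound scan reaches index 0 and
-- ends up scanning the whole list: it computes plain membership of 6.
theorem array6_neg (list : List Int) (index : Int) (hneg : index < 0)
    (hge : -(list.length : Int) ≤ index) :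
    array6 list index = list.contains 6 := by
  rw [array6]
  have hlen : ¬ (list.length : Int) ≤ index := by omega
  simp only [hlen, if_neg, not_false_iff]
  have hin : PySem.Raise.InRange list.length index := by
    constructor <;> omega
  obtain ⟨v, hv⟩ : ∃ v, PySem.List.pyGet? list index = some v := by
    cases hget : PySem.List.pyGet? list index with
    | none => exact absurd hin ((PySem.List.pyGet?_eq_none_iff list index).mp hget)
    | some v => exact ⟨v, rfl⟩
  have hmem : v ∈ list := PySem.List.mem_of_pyGet?_eq_some list hv
  rw [hv]
  by_cases h6 : v = 6
  · subst h6
    simp [hmem]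
  · have hb : (v == 6) = false := by simp [h6]
    simp only [hb, if_neg, Bool.false_eq_true, not_false_iff]
    by_cases hz : index + 1 < 0
    · exact array6_neg list (index + 1) hz (by omega)
    · have : index + 1 = 0 := by omega
      rw [this, array6_nonneg list 0 le_rfl]
      simp
termination_by index.toNat + index.natAbs
decreasing_by omega

theorem array6_alt_eq (list : List Int) (index : Int) :
    array6_alt list index =
      (if 0 ≤ index then (list.drop index.toNat).contains 6 else list.contains 6) := by
  unfold array6_alt
  by_cases h : 0 ≤ index
  · have : index = ((index.toNat : Nat) : Int) := by omega
    simp only [h, if_pos]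
    rw [this, PySem.List.slice_from_natCast, Int.toNat_natCast]
  · simp only [h, if_neg, not_false_iff]
    have : (PySem.List.slice list (some 0) none) = list := by
      rw [show ((0:Int)) = ((0:Nat):Int) from rfl, PySem.List.slice_from_natCast]
      simp
    rw [this]

-- ===== VERDICT (by name: the statement is the Claim_ definition above) =====
theorem array6_spec : Claim_equal_array6 := by
  intro list index _ hpre
  unfold Spec_array6
  rw [array6_alt_eq]
  by_cases h : 0 ≤ index
  · rw [if_pos h, array6_nonneg list index h]
  · rw [if_neg h, array6_neg list index (by omega) hpre]
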